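-- pv_equiv track=rewrite | github.com/qkdk/coding-test | 프로그래머스/2/388353. 지게차와 크레인/지게차와 크레인.py | boundary_check
-- ===== SOURCE A (Python) =====
-- import copy
--
-- vector = [[-1, 0],[0,1],[1,0],[0,-1]]
--
-- def boundary_check(target, matrix):
--     cp_matrix = copy.deepcopy(matrix)
--
--     for y in range(len(matrix)):
--         for x in range(len(matrix[0])):
--             if matrix[y][x] == target:
--                 visited = [[False] * len(matrix[0]) for _ in range(len(matrix))]
--                 visited[y][x] = True
--
--                 result = dfs(y, x, matrix, visited)
--                 if result:
--                     cp_matrix[y][x] = 0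
--
--
--     return cp_matrix
--
-- def dfs(y, x, matrix, visited):
--     result = False
--
--     for d in vector:
--         dy = d[0]
--         dx = d[1]
--
--         ny = y + dy
--         nx = x + dx
--
--         if ny < 0 or nx < 0 or ny >= len(matrix) or nx >= len(matrix[0]):
--             return True
--
--         if visited[ny][nx]:
--             continue
--
--         if matrix[ny][nx] == 0:
--             visited[ny][nx] = True
--             result = result or dfs(ny, nx, matrix, visited)
--
--     return result
-- ===== SOURCE B (Python) =====
-- def boundary_check(target, matrix):
--     h = len(matrix)
--     w = len(matrix[0]) if matrix else 0
--
--     def edge(y, x):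
--         return y == 0 or x == 0 or y + 1 == h or x + 1 == w
--
--     # S: zero cells whose zero-component touches the boundary, computed once
--     # by a monotone fixpoint iteration (instead of one DFS per target cell).
--     S = [[matrix[y][x] == 0 and edge(y, x) for x in range(w)] for y in range(h)]
--
--     def step(S):
--         return [[S[y][x] or (matrix[y][x] == 0 and (
--                     (y > 0 and S[y - 1][x]) or (y + 1 < h and S[y + 1][x]) or
--                     (x > 0 and S[y][x - 1]) or (x + 1 < w and S[y][x + 1])))
--                  for x in range(w)] for y in range(h)]
--
--     for _ in range(h * w + 1):
--         S2 = step(S)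
--         if S2 == S:
--             break
--         S = S2
--
--     result = []
--     for y in range(h):
--         row = list(matrix[y])
--         for x in range(w):
--             if matrix[y][x] == target and (edge(y, x) or
--                     (y > 0 and S[y - 1][x]) or (y + 1 < h and S[y + 1][x]) or
--                     (x > 0 and S[y][x - 1]) or (x + 1 < w and S[y][x + 1])):
--                 row[x] = 0
--         result.append(row)
--     return result
-- ===== Notes on version B (the rewrite author's own statement) =====
-- stated objective: alternative
-- what changed: A runs a fresh visited-array DFS from every target cell; B computes the set of boundary-connected 0-cells once by a monotone fixpoint iteration and then marks each target cell with an O(1) neighbourhood test.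
import Mathlib
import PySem

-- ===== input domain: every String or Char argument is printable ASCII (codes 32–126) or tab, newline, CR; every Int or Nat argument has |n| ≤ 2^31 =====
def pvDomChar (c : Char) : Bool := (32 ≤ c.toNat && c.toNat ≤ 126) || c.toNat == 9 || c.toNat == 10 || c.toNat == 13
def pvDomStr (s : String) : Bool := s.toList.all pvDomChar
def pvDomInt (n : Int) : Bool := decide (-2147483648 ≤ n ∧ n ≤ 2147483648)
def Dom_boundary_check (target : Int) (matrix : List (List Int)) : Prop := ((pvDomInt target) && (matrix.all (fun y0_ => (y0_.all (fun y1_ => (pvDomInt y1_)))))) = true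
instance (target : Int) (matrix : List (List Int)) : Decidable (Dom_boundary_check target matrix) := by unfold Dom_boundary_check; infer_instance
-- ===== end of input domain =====

-- B replaces A's per-target-cell DFS by ONE shared fixpoint computation of the
-- boundary-connected 0-cells followed by a single marking pass (objective: alternative;
-- it avoids re-running a DFS with a fresh visited array for every target cell).

-- ===== PORT A =====
-- matrix[y][x] for in-range indices (all accesses are in range under Pre_)
def pvMget (m : List (List Int)) (y x : Nat) : Int := (m.getD y []).getD x 1
-- visited[y][x] read / in-place write (indices are bounds-checked before use in A)
def pvVget (V : List (List Bool)) (y x : Nat) : Bool := (V.getD y []).getD x false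
def pvVset (V : List (List Bool)) (y x : Nat) : List (List Bool) :=
  V.set y ((V.getD y []).set x true)
def pvVector : List (Int × Int) := [(-1,0),(0,1),(1,0),(0,-1)]

mutual
-- dfs(y, x, matrix, visited); fuel only makes the recursion total: h*w+1 is
-- never exhausted because each recursive call marks one more visited cell.
def pvDfs (fuel : Nat) (y x : Int) (m : List (List Int)) (V : List (List Bool)) :
    Bool × List (List Bool) :=
  match fuel with
  | 0 => (false, V)
  | fuel+1 => pvDfsLoop fuel y x m pvVector false V
termination_by (fuel, 0)

-- the 'for d in vector' loop of dfs: ds = remaining directions, res = result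
def pvDfsLoop (fuel : Nat) (y x : Int) (m : List (List Int)) (ds : List (Int × Int))
    (res : Bool) (V : List (List Bool)) : Bool × List (List Bool) :=
  match ds with
  | [] => (res, V)
  | (dy, dx) :: rest =>
    let ny := y + dy
    let nx := x + dx
    if ny < 0 ∨ nx < 0 ∨ (m.length : Int) ≤ ny ∨ ((m.headD []).length : Int) ≤ nx then
      (true, V)
    else if pvVget V ny.toNat nx.toNat then
      pvDfsLoop fuel y x m rest res V
    else if pvMget m ny.toNat nx.toNat = 0 then
      let V1 := pvVset V ny.toNat nx.toNat
      if res then pvDfsLoop fuel y x m rest true V1   -- 'result or dfs(...)' short-circuits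
      else
        let p := pvDfs fuel ny nx m V1
        pvDfsLoop fuel y x m rest p.1 p.2
    else pvDfsLoop fuel y x m rest res V
termination_by (fuel, ds.length + 1)
end

def boundary_check (target : Int) (matrix : List (List Int)) : List (List Int) :=
  let h := matrix.length
  let w := (matrix.headD []).length
  (List.range h).foldl (fun cp y =>
    (List.range w).foldl (fun cp x =>
      if pvMget matrix y x = target then
        let V0 := pvVset ((List.range h).map (fun _ => List.replicate w false)) y x
        if (pvDfs (h*w+1) (y:Int) (x:Int) matrix V0).1 then
          cp.set y ((cp.getD y []).set x 0)
        else cp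
      else cp) cp) matrix

-- ===== PORT B =====
def pvEdge (h w y x : Nat) : Bool := y == 0 || x == 0 || y+1 == h || x+1 == w
-- 'some in-bounds neighbour of (y,x) is in S'
def pvNbr (S : List (List Bool)) (h w y x : Nat) : Bool :=
  (decide (0 < y) && pvVget S (y-1) x) || (decide (y+1 < h) && pvVget S (y+1) x) ||
  (decide (0 < x) && pvVget S y (x-1)) || (decide (x+1 < w) && pvVget S y (x+1))
def pvStep (m : List (List Int)) (h w : Nat) (S : List (List Bool)) : List (List Bool) :=
  (List.range h).map (fun y => (List.range w).map (fun x =>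
    pvVget S y x || (decide (pvMget m y x = 0) && pvNbr S h w y x)))
-- the bounded 'for _ in range(h*w+1): … if S2 == S: break' loop
def pvIter (m : List (List Int)) (h w : Nat) : Nat → List (List Bool) → List (List Bool)
  | 0, S => S
  | f+1, S => let S2 := pvStep m h w S; if S2 = S then S else pvIter m h w f S2

def boundary_check_alt (target : Int) (matrix : List (List Int)) : List (List Int) :=
  let h := matrix.length
  let w := (matrix.headD []).length
  let S0 := (List.range h).map (fun y => (List.range w).map (fun x =>
    decide (pvMget matrix y x = 0) && pvEdge h w y x))
  let S := pvIter matrix h w (h*w+1) S0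
  (List.range h).map (fun y =>
    (List.range w).foldl (fun row x =>
      if decide (pvMget matrix y x = target) && (pvEdge h w y x || pvNbr S h w y x) then
        row.set x 0
      else row) (matrix.getD y []))

-- ===== PRECONDITION & SPEC =====
-- Pre_ excludes matrices in which some row is shorter than the first row: there
-- A raises IndexError (and B raises too); it admits all other inputs.
def Pre_boundary_check (target : Int) (matrix : List (List Int)) : Prop :=
  ∀ row ∈ matrix, (matrix.headD []).length ≤ row.length
instance (target : Int) (matrix : List (List Int)) : Decidable (Pre_boundary_check target matrix) := by
  unfold Pre_boundary_check; infer_instance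
def pvWitness_boundary_check : Int × List (List Int) := (1, [[1, 0], [0, 1]])

def Spec_boundary_check (target : Int) (matrix : List (List Int)) (out : List (List Int)) : Prop := out = boundary_check_alt target matrix
instance (target : Int) (matrix : List (List Int)) (out : List (List Int)) : Decidable (Spec_boundary_check target matrix out) := by unfold Spec_boundary_check; infer_instance

-- ===== CLAIM (what is proved, stated in full; the proofs are below) =====
def Claim_equal_boundary_check : Prop := ∀ (target : Int) (matrix : List (List Int)), Dom_boundary_check target matrix → Pre_boundary_check target matrix → Spec_boundary_check target matrix (boundary_check target matrix)

-- ===== LEMMAS AND PROOFS =====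

def pvH (m : List (List Int)) : Nat := m.length
def pvW (m : List (List Int)) : Nat := (m.headD []).length

-- cell (y,x) is on the border of the h×w box
def EdgeP (h w y x : Nat) : Prop := y = 0 ∨ x = 0 ∨ y+1 = h ∨ x+1 = w
-- (y,x) and (y',x') are in-bounds 4-neighbours
def Adj (h w y x y' x' : Nat) : Prop :=
  y < h ∧ x < w ∧ y' < h ∧ x' < w ∧
  ((y' = y+1 ∧ x' = x) ∨ (y = y'+1 ∧ x' = x) ∨ (x' = x+1 ∧ y' = y) ∨ (x = x'+1 ∧ y' = y))

-- an 'escape' from (y,x): it is on the edge, or a path of 0-cells leads to the edge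
inductive Esc (m : List (List Int)) (h w : Nat) : Nat → Nat → Prop where
  | edge : ∀ y x, y < h → x < w → EdgeP h w y x → Esc m h w y x
  | step : ∀ y x y' x', Adj h w y x y' x' → pvMget m y' x' = 0 → Esc m h w y' x' →
      Esc m h w y x

-- 0-cells whose 0-component touches the edge (what B's fixpoint computes)
inductive FE (m : List (List Int)) (h w : Nat) : Nat → Nat → Prop where
  | base : ∀ y x, y < h → x < w → EdgeP h w y x → pvMget m y x = 0 → FE m h w y x
  | step : ∀ y x y' x', FE m h w y x → Adj h w y x y' x' → pvMget m y' x' = 0 → FE m h w y' x'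

def pvShape (h w : Nat) (V : List (List Bool)) : Prop :=
  V.length = h ∧ ∀ r ∈ V, r.length = w
def pvVSub (V V' : List (List Bool)) : Prop :=
  ∀ a b, pvVget V a b = true → pvVget V' a b = true
def tcnt (V : List (List Bool)) : Nat := (V.map (fun r => r.count true)).sum

-- closure property of the cells dfs newly marked on a failed search
def pvClosed (m : List (List Int)) (h w : Nat) (V' V : List (List Bool)) : Prop :=
  ∀ a b, pvVget V' a b = true → pvVget V a b = false →
    a < h ∧ b < w ∧ pvMget m a b = 0 ∧ ¬ EdgeP h w a b ∧
    ∀ a' b', Adj h w a b a' b' → pvMget m a' b' = 0 → pvVget V' a' b' = true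

def nbOOB (h w y x : Nat) (d : Int × Int) : Prop :=
  (y:Int)+d.1 < 0 ∨ (x:Int)+d.2 < 0 ∨ (h:Int) ≤ (y:Int)+d.1 ∨ (w:Int) ≤ (x:Int)+d.2
def nbY (y : Nat) (d : Int × Int) : Nat := ((y:Int)+d.1).toNat
def nbX (x : Nat) (d : Int × Int) : Nat := ((x:Int)+d.2).toNat

def DfsPost (m : List (List Int)) (h w y x : Nat) (V : List (List Bool))
    (out : Bool × List (List Bool)) : Prop :=
  pvVSub V out.2 ∧ pvShape h w out.2 ∧
  (out.1 = true → Esc m h w y x) ∧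
  (out.1 = false → ¬ EdgeP h w y x ∧
    (∀ a b, Adj h w y x a b → pvMget m a b = 0 → pvVget out.2 a b = true) ∧
    pvClosed m h w out.2 V)

def LoopPost (m : List (List Int)) (h w y x : Nat) (ds : List (Int × Int)) (res : Bool)
    (V : List (List Bool)) (out : Bool × List (List Bool)) : Prop :=
  pvVSub V out.2 ∧ pvShape h w out.2 ∧
  (out.1 = true → res = true ∨ Esc m h w y x) ∧
  (out.1 = false → res = false ∧
    (∀ d ∈ ds, ¬ nbOOB h w y x d ∧
      (pvMget m (nbY y d) (nbX x d) = 0 → pvVget out.2 (nbY y d) (nbX x d) = true)) ∧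
    pvClosed m h w out.2 V)

-- ---- small facts ----

theorem shape_row_len (h w : Nat) (V : List (List Bool)) (hs : pvShape h w V) (i : Nat) :
    (V.getD i []).length = if i < h then w else 0 := by
  rcases hs with ⟨hl, hr⟩
  by_cases hi : i < h
  · have hyl : i < V.length := hl ▸ hi
    have hmem : V.getD i [] ∈ V := by
      rw [List.getD_eq_getElem _ _ hyl]; exact List.getElem_mem _
    rw [if_pos hi]
    exact hr _ hmem
  · rw [List.getD_eq_default _ _ (by omega)]
    simp [hi]

theorem count_set_true : ∀ (r : List Bool) (x : Nat), x < r.length →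
    r.getD x false = false → ((r.set x true).count true = r.count true + 1)
  | [], x, hx, _ => by simp at hx
  | a :: t, 0, _, hf => by
    simp only [List.getD_cons_zero] at hf
    simp [List.count_cons, hf]
  | a :: t, x+1, hx, hf => by
    have := count_set_true t x (by simpa using hx) (by simpa using hf)
    simp [List.count_cons, this]
    omega

theorem tcnt_set_row : ∀ (V : List (List Bool)) (y : Nat) (r : List Bool), y < V.length →
    tcnt (V.set y r) + (V.getD y []).count true = tcnt V + r.count true
  | [], y, r, hy => by simp at hy
  | a :: t, 0, r, _ => by simp [tcnt]; omega
  | a :: t, y+1, r, hy => by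
    have := tcnt_set_row t y r (by simpa using hy)
    simp only [List.set_cons_succ, tcnt, List.map_cons, List.sum_cons,
      List.getD_cons_succ] at *
    omega

theorem getD_set_self {α : Type} (l : List α) (i : Nat) (a d : α) (h : i < l.length) :
    (l.set i a).getD i d = a := by
  rw [List.getD_eq_getElem?_getD, List.getElem?_set_self h]
  rfl

theorem getD_set_ne {α : Type} (l : List α) (i j : Nat) (a : α) (d : α) (h : i ≠ j) :
    (l.set i a).getD j d = l.getD j d := by
  rw [List.getD_eq_getElem?_getD, List.getElem?_set_ne h, ← List.getD_eq_getElem?_getD]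

theorem grid_get (h w : Nat) (g : Nat → Nat → Bool) (y x : Nat) :
    pvVget ((List.range h).map (fun a => (List.range w).map (fun b => g a b))) y x
      = if y < h ∧ x < w then g y x else false := by
  unfold pvVget
  by_cases hy : y < h <;> by_cases hx : x < w <;>
    simp [List.getD_eq_getElem?_getD, List.getElem?_map, List.getElem?_range, hy, hx]

theorem pvVget_oob (h w : Nat) (V : List (List Bool)) (hs : pvShape h w V) (y x : Nat)
    (h' : ¬ (y < h ∧ x < w)) : pvVget V y x = false := by
  unfold pvVget
  rcases hs with ⟨hl, hr⟩
  by_cases hy : y < h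
  · have hx : ¬ x < w := fun hx => h' ⟨hy, hx⟩
    have hyl : y < V.length := hl ▸ hy
    have hmem : V.getD y [] ∈ V := by
      rw [List.getD_eq_getElem _ _ hyl]; exact List.getElem_mem _
    have hlen := hr _ hmem
    exact List.getD_eq_default _ _ (by omega)
  · have h0 : V.getD y [] = [] := List.getD_eq_default _ _ (by rw [hl]; omega)
    rw [h0]
    simp

theorem shape_set (h w : Nat) (V : List (List Bool)) (hs : pvShape h w V) (y x : Nat)
    (hy : y < h) (hx : x < w) : pvShape h w (pvVset V y x) := by
  rcases hs with ⟨hl, hr⟩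
  have hyl : y < V.length := hl ▸ hy
  have hmem : V.getD y [] ∈ V := by
    rw [List.getD_eq_getElem _ _ hyl]; exact List.getElem_mem _
  refine ⟨by simp [pvVset, hl], ?_⟩
  intro r hrmem
  rcases List.mem_or_eq_of_mem_set hrmem with hm | hm
  · exact hr _ hm
  · rw [hm, List.length_set]; exact hr _ hmem

theorem pvVget_set (h w : Nat) (V : List (List Bool)) (hs : pvShape h w V)
    (y x : Nat) (hy : y < h) (hx : x < w) (a b : Nat) :
    pvVget (pvVset V y x) a b = if a = y ∧ b = x then true else pvVget V a b := by
  rcases hs with ⟨hl, hr⟩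
  have hyl : y < V.length := hl ▸ hy
  have hmem : V.getD y [] ∈ V := by
    rw [List.getD_eq_getElem _ _ hyl]; exact List.getElem_mem _
  have hrowlen : (V.getD y []).length = w := hr _ hmem
  unfold pvVget pvVset
  by_cases hay : a = y
  · subst hay
    rw [getD_set_self V a _ _ (by omega)]
    by_cases hbx : b = x
    · subst hbx
      rw [getD_set_self _ b _ _ (by omega)]
      simp
    · rw [getD_set_ne _ x b _ _ (by omega)]
      simp [hbx]
  · rw [getD_set_ne V y a _ _ (by omega)]
    simp [hay]

theorem rows_le (a b : List Bool) (hl : a.length = b.length)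
    (hsub : ∀ i, a.getD i false = true → b.getD i false = true) :
    a.count true ≤ b.count true ∧ (a.count true = b.count true → a = b) := by
  induction a generalizing b with
  | nil =>
    cases b with
    | nil => exact ⟨le_refl _, fun _ => rfl⟩
    | cons hb tb => simp at hl
  | cons ha ta ih =>
    cases b with
    | nil => simp at hl
    | cons hb tb =>
      have hlt : ta.length = tb.length := by simpa using hl
      have hsubt : ∀ i, ta.getD i false = true → tb.getD i false = true := by
        intro i hi
        have := hsub (i+1) (by simpa using hi)
        simpa using this
      obtain ⟨hle, heq⟩ := ih tb hlt hsubt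
      have hhead : ha = true → hb = true := by
        intro hh
        have := hsub 0 (by simpa [hh] using rfl)
        simpa using this
      cases ha
      · cases hb
        · constructor
          · simpa [List.count_cons] using hle
          · intro hc
            have hc' : ta.count true = tb.count true := by
              simpa [List.count_cons] using hc
            simp [heq hc']
        · constructor
          · simp only [List.count_cons]
            simp
            omega
          · intro hc
            simp [List.count_cons] at hc
            omega
      · have hb' : hb = true := hhead rfl
        subst hb'
        constructor
        · simp [List.count_cons]
          omega
        · intro hc
          simp [List.count_cons] at hc
          have hc' : ta.count true = tb.count true := by omega
          simp [heq hc']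

theorem mats_le (A B : List (List Bool)) (hl : A.length = B.length)
    (hrl : ∀ i, (A.getD i []).length = (B.getD i []).length)
    (hsub : ∀ i j, (A.getD i []).getD j false = true → (B.getD i []).getD j false = true) :
    tcnt A ≤ tcnt B ∧ (tcnt A = tcnt B → A = B) := by
  induction A generalizing B with
  | nil =>
    cases B with
    | nil => exact ⟨le_refl _, fun _ => rfl⟩
    | cons hb tb => simp at hl
  | cons ha ta ih =>
    cases B with
    | nil => simp at hl
    | cons hb tb =>
      have hlt : ta.length = tb.length := by simpa using hl
      have hrow := rows_le ha hb (by simpa using hrl 0) (by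
        intro j hj; have := hsub 0 j (by simpa using hj); simpa using this)
      have hrlt : ∀ i, (ta.getD i []).length = (tb.getD i []).length := by
        intro i; have := hrl (i+1); simpa using this
      have hsubt : ∀ i j, (ta.getD i []).getD j false = true →
          (tb.getD i []).getD j false = true := by
        intro i j hj
        have := hsub (i+1) j (by simpa using hj)
        simpa using this
      obtain ⟨hle, heq⟩ := ih tb hlt hrlt hsubt
      constructor
      · simp only [tcnt, List.map_cons, List.sum_cons]
        exact Nat.add_le_add hrow.1 hle
      · intro hc
        simp only [tcnt, List.map_cons, List.sum_cons] at hc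
        simp only [tcnt] at hle heq
        have h1 : ha.count true = hb.count true := by omega
        have h2 : (ta.map (fun r => r.count true)).sum
            = (tb.map (fun r => r.count true)).sum := by omega
        rw [hrow.2 h1, heq h2]

theorem tcnt_mono (h w : Nat) (V V' : List (List Bool)) (hs : pvShape h w V)
    (hs' : pvShape h w V') (hsub : pvVSub V V') : tcnt V ≤ tcnt V' := by
  refine (mats_le V V' (by rw [hs.1, hs'.1]) ?_ hsub).1
  intro i
  by_cases hi : i < h
  · rw [shape_row_len h w V hs i, shape_row_len h w V' hs' i]
  · rw [List.getD_eq_default _ _ (by rw [hs.1]; omega),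
      List.getD_eq_default _ _ (by rw [hs'.1]; omega)]

theorem tcnt_strict (h w : Nat) (V V' : List (List Bool)) (hs : pvShape h w V)
    (hs' : pvShape h w V') (hsub : pvVSub V V') (hne : V ≠ V') : tcnt V < tcnt V' := by
  have hm := mats_le V V' (by rw [hs.1, hs'.1]) (by
    intro i
    by_cases hi : i < h
    · rw [shape_row_len h w V hs i, shape_row_len h w V' hs' i]
    · rw [List.getD_eq_default _ _ (by rw [hs.1]; omega),
        List.getD_eq_default _ _ (by rw [hs'.1]; omega)]) hsub
  rcases Nat.lt_or_ge (tcnt V) (tcnt V') with h' | h'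
  · exact h'
  · exact absurd (hm.2 (by omega)) hne

theorem tcnt_le (h w : Nat) (V : List (List Bool)) (hs : pvShape h w V) : tcnt V ≤ h * w := by
  obtain ⟨hl, hr⟩ := hs
  subst hl
  induction V with
  | nil => simp [tcnt]
  | cons r t ih =>
    have h1 : r.count true ≤ w := by
      have := hr r (by simp)
      calc r.count true ≤ r.length := List.count_le_length
        _ = w := this
    have h2 := ih (fun r hm => hr r (by simp [hm]))
    simp only [tcnt, List.map_cons, List.sum_cons, List.length_cons] at *
    calc r.count true + (t.map (fun r => r.count true)).sum ≤ w + t.length * w := by omega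
      _ = (t.length + 1) * w := by ring

theorem tcnt_set (h w : Nat) (V : List (List Bool)) (hs : pvShape h w V) (y x : Nat)
    (hy : y < h) (hx : x < w) (hf : pvVget V y x = false) :
    tcnt (pvVset V y x) = tcnt V + 1 := by
  rcases hs with ⟨hl, hr⟩
  have hyl : y < V.length := hl ▸ hy
  have hmem : V.getD y [] ∈ V := by
    rw [List.getD_eq_getElem _ _ hyl]; exact List.getElem_mem _
  have hrowlen : (V.getD y []).length = w := hr _ hmem
  have hrow : ((V.getD y []).set x true).count true = (V.getD y []).count true + 1 :=
    count_set_true _ x (by omega) hf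
  have := tcnt_set_row V y ((V.getD y []).set x true) hyl
  unfold pvVset
  omega

theorem tcnt_lt_of_unvisited (h w : Nat) (V : List (List Bool)) (hs : pvShape h w V)
    (y x : Nat) (hy : y < h) (hx : x < w) (hf : pvVget V y x = false) : tcnt V < h * w := by
  have h1 := tcnt_set h w V hs y x hy hx hf
  have h2 := tcnt_le h w (pvVset V y x) (shape_set h w V hs y x hy hx)
  omega

theorem adj_symm {h w y x y' x' : Nat} (hadj : Adj h w y x y' x') : Adj h w y' x' y x := by
  unfold Adj at *; tauto

theorem fe_zero {m : List (List Int)} {h w y x : Nat} (hf : FE m h w y x) :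
    pvMget m y x = 0 ∧ y < h ∧ x < w := by
  induction hf with
  | base y x hy hx he hz => exact ⟨hz, hy, hx⟩
  | step y x y' x' hf hadj hz ih =>
    obtain ⟨_, _, hy', hx', _⟩ := hadj
    exact ⟨hz, hy', hx'⟩

theorem esc_fe {m : List (List Int)} {h w y x : Nat} (he : Esc m h w y x)
    (hz : pvMget m y x = 0) : FE m h w y x := by
  revert hz
  induction he with
  | edge y x hy hx he => exact fun hz => FE.base y x hy hx he hz
  | step y x y' x' hadj hz' he' ih =>
    exact fun hz => FE.step y' x' y x (ih hz') (adj_symm hadj) hz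

theorem fe_esc {m : List (List Int)} {h w y x : Nat} (hf : FE m h w y x) : Esc m h w y x := by
  induction hf with
  | base y x hy hx he hz => exact Esc.edge y x hy hx he
  | step y x y' x' hf hadj hz ih =>
    exact Esc.step y' x' y x (adj_symm hadj) (fe_zero hf).1 ih

theorem edgep_iff (h w y x : Nat) :
    EdgeP h w y x ↔ pvEdge h w y x = true := by
  unfold EdgeP pvEdge
  simp only [Bool.or_eq_true, beq_iff_eq]
  tauto

-- out-of-bounds in some direction of A's vector ↔ the cell is on the edge
theorem oob_edge {h w y x : Nat} (hy : y < h) (hx : x < w) {d : Int × Int}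
    (hd : d ∈ pvVector) (ho : nbOOB h w y x d) : EdgeP h w y x := by
  simp only [pvVector, List.mem_cons, List.not_mem_nil, or_false] at hd
  unfold EdgeP
  rcases hd with rfl | rfl | rfl | rfl <;>
    unfold nbOOB at ho <;> simp at ho <;> omega

theorem edge_oob {h w y x : Nat} (hy : y < h) (hx : x < w) (he : EdgeP h w y x) :
    ∃ d ∈ pvVector, nbOOB h w y x d := by
  unfold EdgeP at he
  rcases he with he | he | he | he
  · exact ⟨(-1,0), by simp [pvVector], by unfold nbOOB; simp <;> omega⟩
  · exact ⟨(0,-1), by simp [pvVector], by unfold nbOOB; simp <;> omega⟩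
  · exact ⟨(1,0), by unfold pvVector; simp, by unfold nbOOB; simp <;> omega⟩
  · exact ⟨(0,1), by unfold pvVector; simp, by unfold nbOOB; simp <;> omega⟩

-- an in-bounds direction of A's vector gives an adjacent cell, and conversely
theorem inb_adj {h w y x : Nat} (hy : y < h) (hx : x < w) {d : Int × Int}
    (hd : d ∈ pvVector) (ho : ¬ nbOOB h w y x d) : Adj h w y x (nbY y d) (nbX x d) := by
  simp only [pvVector, List.mem_cons, List.not_mem_nil, or_false] at hd
  unfold Adj nbY nbX
  rcases hd with rfl | rfl | rfl | rfl <;>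
    unfold nbOOB at ho <;> simp at ho ⊢ <;> omega

theorem adj_dir {h w y x a b : Nat} (hadj : Adj h w y x a b) :
    ∃ d ∈ pvVector, ¬ nbOOB h w y x d ∧ a = nbY y d ∧ b = nbX x d := by
  obtain ⟨hy, hx, ha, hb, hc⟩ := hadj
  rcases hc with ⟨rfl, rfl⟩ | ⟨hy2, rfl⟩ | ⟨rfl, rfl⟩ | ⟨hx2, rfl⟩
  · exact ⟨(1,0), by simp [pvVector], by unfold nbOOB; simp <;> omega,
      by unfold nbY; simp <;> omega, by unfold nbX; simp⟩
  · exact ⟨(-1,0), by simp [pvVector], by unfold nbOOB; simp <;> omega,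
      by unfold nbY; simp <;> omega, by unfold nbX; simp⟩
  · exact ⟨(0,1), by simp [pvVector], by unfold nbOOB; simp <;> omega,
      by unfold nbY; simp, by unfold nbX; simp <;> omega⟩
  · exact ⟨(0,-1), by simp [pvVector], by unfold nbOOB; simp <;> omega,
      by unfold nbY; simp, by unfold nbX; simp <;> omega⟩

-- ---- A-side: the dfs postcondition ----

theorem loop_post (m : List (List Int)) (fuel : Nat)
    (IH : ∀ y x V, y < pvH m → x < pvW m → pvShape (pvH m) (pvW m) V →
      pvVget V y x = true → pvH m * pvW m - tcnt V < fuel →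
      DfsPost m (pvH m) (pvW m) y x V (pvDfs fuel y x m V)) :
    ∀ ds, (∀ d ∈ ds, d ∈ pvVector) → ∀ y x V res, y < pvH m → x < pvW m →
      pvShape (pvH m) (pvW m) V → pvH m * pvW m - tcnt V < fuel + 1 →
      LoopPost m (pvH m) (pvW m) y x ds res V (pvDfsLoop fuel y x m ds res V) := by
  intro ds
  induction ds with
  | nil =>
    intro _ y x V res hy hx hs hf
    rw [pvDfsLoop]
    exact ⟨fun a b h => h, hs, fun ht => Or.inl ht,
      fun hf' => ⟨hf', fun d hd => absurd hd (by simp),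
        fun a b h1 h2 => by rw [h1] at h2; cases h2⟩⟩
  | cons d rest ihds =>
    obtain ⟨dy, dx⟩ := d
    intro hds y x V res hy hx hs hf
    have hdmem : (dy, dx) ∈ pvVector := hds _ (by simp)
    have hdrest : ∀ d ∈ rest, d ∈ pvVector := fun d hd => hds d (by simp [hd])
    rw [pvDfsLoop]
    by_cases hoob : nbOOB (pvH m) (pvW m) y x (dy, dx)
    · have hoob' : ((y:Int) + dy < 0 ∨ (x:Int) + dx < 0 ∨ (m.length : Int) ≤ (y:Int) + dy ∨
        ((m.headD []).length : Int) ≤ (x:Int) + dx) := hoob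
      rw [if_pos hoob']
      exact ⟨fun a b h => h, hs,
        fun _ => Or.inr (Esc.edge y x hy hx (oob_edge hy hx hdmem hoob)),
        fun hc => by cases hc⟩
    · have hoob' : ¬((y:Int) + dy < 0 ∨ (x:Int) + dx < 0 ∨ (m.length : Int) ≤ (y:Int) + dy ∨
        ((m.headD []).length : Int) ≤ (x:Int) + dx) := hoob
      rw [if_neg hoob']
      have hadj : Adj (pvH m) (pvW m) y x (nbY y (dy, dx)) (nbX x (dy, dx)) :=
        inb_adj hy hx hdmem hoob
      have hA : nbY y (dy, dx) < pvH m := hadj.2.2.1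
      have hB : nbX x (dy, dx) < pvW m := hadj.2.2.2.1
      by_cases hvis : pvVget V ((y:Int) + dy).toNat ((x:Int) + dx).toNat = true
      · rw [if_pos hvis]
        obtain ⟨hsub, hsh, htrue, hfalse⟩ := ihds hdrest y x V res hy hx hs hf
        refine ⟨hsub, hsh, htrue, ?_⟩
        intro hfF
        obtain ⟨hres, hdirs, hclosed⟩ := hfalse hfF
        refine ⟨hres, ?_, hclosed⟩
        intro d' hd'
        rcases List.mem_cons.mp hd' with rfl | hd'
        · exact ⟨hoob, fun _ => hsub _ _ hvis⟩
        · exact hdirs d' hd'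
      · rw [if_neg hvis]
        by_cases hz : pvMget m ((y:Int) + dy).toNat ((x:Int) + dx).toNat = 0
        · rw [if_pos hz]
          have hvisf : pvVget V ((y:Int) + dy).toNat ((x:Int) + dx).toNat = false := by
            revert hvis
            cases pvVget V ((y:Int) + dy).toNat ((x:Int) + dx).toNat <;> simp
          have hsh1 : pvShape (pvH m) (pvW m) (pvVset V (nbY y (dy, dx)) (nbX x (dy, dx))) :=
            shape_set _ _ V hs _ _ hA hB
          have hsub1 : pvVSub V (pvVset V (nbY y (dy, dx)) (nbX x (dy, dx))) := by
            intro a' b' h'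
            rw [pvVget_set _ _ V hs _ _ hA hB]
            split
            · rfl
            · exact h'
          have hv1 : pvVget (pvVset V (nbY y (dy, dx)) (nbX x (dy, dx)))
              (nbY y (dy, dx)) (nbX x (dy, dx)) = true := by
            rw [pvVget_set _ _ V hs _ _ hA hB]
            simp
          have htc : tcnt (pvVset V (nbY y (dy, dx)) (nbX x (dy, dx))) = tcnt V + 1 :=
            tcnt_set _ _ V hs _ _ hA hB hvisf
          have htlt : tcnt V < pvH m * pvW m := tcnt_lt_of_unvisited _ _ V hs _ _ hA hB hvisf
          by_cases hres : res = true
          · rw [if_pos hres]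
            obtain ⟨hsub', hsh', htrue', hfalse'⟩ :=
              ihds hdrest y x (pvVset V (nbY y (dy, dx)) (nbX x (dy, dx))) true hy hx hsh1
                (by omega)
            refine ⟨fun a' b' h' => hsub' _ _ (hsub1 _ _ h'), hsh', fun _ => Or.inl hres, ?_⟩
            intro hfF
            obtain ⟨hc, _, _⟩ := hfalse' hfF
            cases hc
          · have hresf : res = false := by revert hres; cases res <;> simp
            rw [if_neg hres]
            have hcast1 : ((y:Int) + dy) = ((nbY y (dy, dx) : Nat) : Int) := by
              have h0 : (0:Int) ≤ (y:Int) + dy := by unfold nbOOB at hoob; simp at hoob; omega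
              unfold nbY
              rw [Int.toNat_of_nonneg h0]
            have hcast2 : ((x:Int) + dx) = ((nbX x (dy, dx) : Nat) : Int) := by
              have h0 : (0:Int) ≤ (x:Int) + dx := by unfold nbOOB at hoob; simp at hoob; omega
              unfold nbX
              rw [Int.toNat_of_nonneg h0]
            rw [hcast1, hcast2]
            simp only [Int.toNat_natCast]
            obtain ⟨psub, psh, ptrue, pfalse⟩ :=
              IH (nbY y (dy, dx)) (nbX x (dy, dx))
                (pvVset V (nbY y (dy, dx)) (nbX x (dy, dx))) hA hB hsh1 hv1 (by omega)
            obtain ⟨lsub, lsh, ltrue, lfalse⟩ :=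
              ihds hdrest y x
                (pvDfs fuel (nbY y (dy, dx) : Nat) (nbX x (dy, dx) : Nat) m
                  (pvVset V (nbY y (dy, dx)) (nbX x (dy, dx)))).2
                (pvDfs fuel (nbY y (dy, dx) : Nat) (nbX x (dy, dx) : Nat) m
                  (pvVset V (nbY y (dy, dx)) (nbX x (dy, dx)))).1 hy hx psh
                (by have := tcnt_mono (pvH m) (pvW m) _ _ hsh1 psh psub; omega)
            refine ⟨fun a' b' h' => lsub _ _ (psub _ _ (hsub1 _ _ h')), lsh, ?_, ?_⟩
            · intro ht
              rcases ltrue ht with hp | hesc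
              · exact Or.inr (Esc.step y x _ _ hadj hz (ptrue hp))
              · exact Or.inr hesc
            · intro hfF
              obtain ⟨hp1, hdirs, hclosedLP⟩ := lfalse hfF
              obtain ⟨hnedge, hnbrs, hclosedP⟩ := pfalse hp1
              refine ⟨hresf, ?_, ?_⟩
              · intro d' hd'
                rcases List.mem_cons.mp hd' with rfl | hd'
                · exact ⟨hoob, fun _ => lsub _ _ (psub _ _ hv1)⟩
                · exact hdirs d' hd'
              · intro c e hce hceV
                by_cases h2 : pvVget (pvDfs fuel (nbY y (dy, dx) : Nat) (nbX x (dy, dx) : Nat) m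
                    (pvVset V (nbY y (dy, dx)) (nbX x (dy, dx)))).2 c e = true
                · by_cases h1 : pvVget (pvVset V (nbY y (dy, dx)) (nbX x (dy, dx))) c e = true
                  · rw [pvVget_set _ _ V hs _ _ hA hB] at h1
                    by_cases hpair : c = nbY y (dy, dx) ∧ e = nbX x (dy, dx)
                    · obtain ⟨rfl, rfl⟩ := hpair
                      exact ⟨hA, hB, hz, hnedge,
                        fun a' b' hadj' hz' => lsub _ _ (hnbrs a' b' hadj' hz')⟩
                    · rw [if_neg hpair] at h1
                      rw [h1] at hceV
                      cases hceV
                  · have h1f : pvVget (pvVset V (nbY y (dy, dx)) (nbX x (dy, dx))) c e = false := by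
                      revert h1
                      cases pvVget (pvVset V (nbY y (dy, dx)) (nbX x (dy, dx))) c e <;> simp
                    obtain ⟨q1, q2, q3, q4, q5⟩ := hclosedP c e h2 h1f
                    exact ⟨q1, q2, q3, q4, fun a' b' ha' hz' => lsub _ _ (q5 a' b' ha' hz')⟩
                · have h2f : pvVget (pvDfs fuel (nbY y (dy, dx) : Nat) (nbX x (dy, dx) : Nat) m
                      (pvVset V (nbY y (dy, dx)) (nbX x (dy, dx)))).2 c e = false := by
                    revert h2
                    cases pvVget (pvDfs fuel (nbY y (dy, dx) : Nat) (nbX x (dy, dx) : Nat) m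
                      (pvVset V (nbY y (dy, dx)) (nbX x (dy, dx)))).2 c e <;> simp
                  exact hclosedLP c e hce h2f
        · rw [if_neg hz]
          obtain ⟨hsub, hsh', htrue, hfalse⟩ := ihds hdrest y x V res hy hx hs hf
          refine ⟨hsub, hsh', htrue, ?_⟩
          intro hfF
          obtain ⟨hres, hdirs, hclosed⟩ := hfalse hfF
          refine ⟨hres, ?_, hclosed⟩
          intro d' hd'
          rcases List.mem_cons.mp hd' with rfl | hd'
          · exact ⟨hoob, fun hzz => absurd hzz hz⟩
          · exact hdirs d' hd'

theorem dfs_post (m : List (List Int)) (fuel : Nat) :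
    ∀ y x V, y < pvH m → x < pvW m → pvShape (pvH m) (pvW m) V →
      pvVget V y x = true → pvH m * pvW m - tcnt V < fuel →
      DfsPost m (pvH m) (pvW m) y x V (pvDfs fuel y x m V) := by
  induction fuel with
  | zero =>
    intro y x V hy hx hs hv hf
    exact absurd hf (by omega)
  | succ fuel ih =>
    intro y x V hy hx hs hv hf
    rw [pvDfs]
    obtain ⟨hsub, hsh, htrue, hfalse⟩ :=
      loop_post m fuel ih pvVector (fun d hd => hd) y x V false hy hx hs hf
    refine ⟨hsub, hsh, ?_, ?_⟩
    · intro ht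
      rcases htrue ht with hcontra | hesc
      · cases hcontra
      · exact hesc
    · intro hfF
      obtain ⟨_, hdirs, hclosed⟩ := hfalse hfF
      refine ⟨?_, ?_, hclosed⟩
      · intro hedge
        obtain ⟨d, hd, ho⟩ := edge_oob hy hx hedge
        exact (hdirs d hd).1 ho
      · intro a b hadj hz
        obtain ⟨d, hd, hno, ha, hb⟩ := adj_dir hadj
        rw [ha, hb] at hz ⊢
        exact (hdirs d hd).2 hz

theorem dfs_iff_esc (m : List (List Int)) (y x : Nat) (hy : y < pvH m) (hx : x < pvW m) :
    (pvDfs (pvH m * pvW m + 1) y x m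
        (pvVset ((List.range (pvH m)).map (fun _ => List.replicate (pvW m) false)) y x)).1 = true
      ↔ Esc m (pvH m) (pvW m) y x := by
  have hbase_sh : pvShape (pvH m) (pvW m)
      ((List.range (pvH m)).map (fun _ => List.replicate (pvW m) false)) := by
    constructor
    · simp
    · intro r hr
      simp only [List.mem_map, List.mem_range] at hr
      obtain ⟨a, _, rfl⟩ := hr
      simp
  have hbase_get : ∀ a b, pvVget
      ((List.range (pvH m)).map (fun _ => List.replicate (pvW m) false)) a b = false := by
    intro a b
    by_cases hab : a < pvH m ∧ b < pvW m
    · unfold pvVget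
      have h1 : a < ((List.range (pvH m)).map
          (fun _ => List.replicate (pvW m) false)).length := by simpa using hab.1
      rw [List.getD_eq_getElem _ _ h1, List.getElem_map]
      have h2 : b < (List.replicate (pvW m) false).length := by simpa using hab.2
      rw [List.getD_eq_getElem _ _ h2]
      simp
    · exact pvVget_oob _ _ _ hbase_sh a b hab
  set V0 := pvVset ((List.range (pvH m)).map (fun _ => List.replicate (pvW m) false)) y x
    with hV0def
  have hsh0 : pvShape (pvH m) (pvW m) V0 := shape_set _ _ _ hbase_sh y x hy hx
  have hchar : ∀ a b, pvVget V0 a b = if a = y ∧ b = x then true else false := by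
    intro a b
    rw [hV0def, pvVget_set _ _ _ hbase_sh y x hy hx, hbase_get]
  have hv0 : pvVget V0 y x = true := by rw [hchar]; simp
  obtain ⟨hsub, hsh, htrue, hfalse⟩ :=
    dfs_post m (pvH m * pvW m + 1) y x V0 hy hx hsh0 hv0 (by omega)
  constructor
  · exact htrue
  · intro hesc
    by_contra hne
    have hfF : (pvDfs (pvH m * pvW m + 1) (y : Nat) (x : Nat) m V0).1 = false := by
      revert hne
      cases (pvDfs (pvH m * pvW m + 1) (y : Nat) (x : Nat) m V0).1 <;> simp
    obtain ⟨hnedge, hnbrs, hclosed⟩ := hfalse hfF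
    have hpairof : ∀ a b, pvVget V0 a b = true → a = y ∧ b = x := by
      intro a b h0
      rw [hchar] at h0
      by_cases hp : a = y ∧ b = x
      · exact hp
      · rw [if_neg hp] at h0
        cases h0
    have hkey : ∀ a b, Esc m (pvH m) (pvW m) a b →
        pvVget (pvDfs (pvH m * pvW m + 1) (y : Nat) (x : Nat) m V0).2 a b = true → False := by
      intro a b hesc'
      induction hesc' with
      | edge a b ha hb hE =>
        intro hmem
        by_cases h0 : pvVget V0 a b = true
        · obtain ⟨rfl, rfl⟩ := hpairof a b h0
          exact hnedge hE
        · have h0f : pvVget V0 a b = false := by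
            revert h0
            cases pvVget V0 a b <;> simp
          exact ((hclosed a b hmem h0f).2.2.2.1) hE
      | step a b a' b' hadj hz hesc'' ih =>
        intro hmem
        apply ih
        by_cases h0 : pvVget V0 a b = true
        · obtain ⟨rfl, rfl⟩ := hpairof a b h0
          exact hnbrs a' b' hadj hz
        · have h0f : pvVget V0 a b = false := by
            revert h0
            cases pvVget V0 a b <;> simp
          exact (hclosed a b hmem h0f).2.2.2.2 a' b' hadj hz
    exact hkey y x hesc (hsub y x hv0)

-- ---- B-side: the fixpoint computes FE ----

theorem step_get (m : List (List Int)) (h w : Nat) (S : List (List Bool)) (y x : Nat) :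
    pvVget (pvStep m h w S) y x
      = if y < h ∧ x < w then
          (pvVget S y x || (decide (pvMget m y x = 0) && pvNbr S h w y x)) else false := by
  unfold pvStep
  exact grid_get h w _ y x

theorem s0_get (m : List (List Int)) (h w : Nat) (y x : Nat) :
    pvVget ((List.range h).map (fun a => (List.range w).map (fun b =>
      decide (pvMget m a b = 0) && pvEdge h w a b))) y x
      = if y < h ∧ x < w then (decide (pvMget m y x = 0) && pvEdge h w y x) else false :=
  grid_get h w _ y x

theorem grid_shape (h w : Nat) (g : Nat → Nat → Bool) :
    pvShape h w ((List.range h).map (fun a => (List.range w).map (fun b => g a b))) := by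
  constructor
  · simp
  · intro r hr
    simp only [List.mem_map, List.mem_range] at hr
    obtain ⟨a, _, rfl⟩ := hr
    simp

theorem step_shape (m : List (List Int)) (h w : Nat) (S : List (List Bool)) :
    pvShape h w (pvStep m h w S) := by
  unfold pvStep
  exact grid_shape h w _

theorem step_sub (m : List (List Int)) (h w : Nat) (S : List (List Bool))
    (hs : pvShape h w S) : pvVSub S (pvStep m h w S) := by
  intro a b hab
  have hb : a < h ∧ b < w := by
    by_contra hc
    rw [pvVget_oob h w S hs a b hc] at hab
    cases hab
  rw [step_get, if_pos hb, hab]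
  simp

theorem nbr_iff (S : List (List Bool)) (h w y x : Nat) (hy : y < h) (hx : x < w) :
    pvNbr S h w y x = true ↔ ∃ a b, Adj h w y x a b ∧ pvVget S a b = true := by
  unfold pvNbr
  simp only [Bool.or_eq_true, Bool.and_eq_true, decide_eq_true_eq]
  constructor
  · rintro (((⟨h1, h2⟩ | ⟨h1, h2⟩) | ⟨h1, h2⟩) | ⟨h1, h2⟩)
    · exact ⟨y-1, x, by unfold Adj; omega, h2⟩
    · exact ⟨y+1, x, by unfold Adj; omega, h2⟩
    · exact ⟨y, x-1, by unfold Adj; omega, h2⟩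
    · exact ⟨y, x+1, by unfold Adj; omega, h2⟩
  · rintro ⟨a, b, hadj, hS⟩
    obtain ⟨_, _, ha, hb, hc⟩ := hadj
    rcases hc with ⟨rfl, rfl⟩ | ⟨hy2, rfl⟩ | ⟨rfl, rfl⟩ | ⟨hx2, rfl⟩
    · exact Or.inl (Or.inl (Or.inr ⟨ha, hS⟩))
    · refine Or.inl (Or.inl (Or.inl ⟨by omega, ?_⟩))
      have he : y - 1 = a := by omega
      rw [he]; exact hS
    · exact Or.inr ⟨hb, hS⟩
    · refine Or.inl (Or.inr ⟨by omega, ?_⟩)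
      have he : x - 1 = b := by omega
      rw [he]; exact hS

theorem step_sound (m : List (List Int)) (h w : Nat) (S : List (List Bool))
    (hsound : ∀ y x, pvVget S y x = true → FE m h w y x) :
    ∀ y x, pvVget (pvStep m h w S) y x = true → FE m h w y x := by
  intro y x hst
  rw [step_get] at hst
  by_cases hb : y < h ∧ x < w
  · rw [if_pos hb] at hst
    simp only [Bool.or_eq_true, Bool.and_eq_true, decide_eq_true_eq] at hst
    rcases hst with hst | ⟨hz, hn⟩
    · exact hsound y x hst
    · obtain ⟨a, b, hadj, hS⟩ := (nbr_iff S h w y x hb.1 hb.2).mp hn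
      exact FE.step a b y x (hsound a b hS) (adj_symm hadj) hz
  · rw [if_neg hb] at hst
    cases hst

theorem iter_props (m : List (List Int)) (h w : Nat) : ∀ f S, pvShape h w S →
    (∀ y x, pvVget S y x = true → FE m h w y x) →
    pvShape h w (pvIter m h w f S) ∧ pvVSub S (pvIter m h w f S) ∧
    (∀ y x, pvVget (pvIter m h w f S) y x = true → FE m h w y x) := by
  intro f
  induction f with
  | zero => intro S hs hsound; exact ⟨hs, fun a b hab => hab, hsound⟩
  | succ f ih =>
    intro S hs hsound
    rw [pvIter]
    by_cases heq : pvStep m h w S = S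
    · simp only [heq]
      exact ⟨hs, fun a b hab => hab, hsound⟩
    · simp only [if_neg heq]
      obtain ⟨h1, h2, h3⟩ := ih (pvStep m h w S) (step_shape m h w S) (step_sound m h w S hsound)
      exact ⟨h1, fun a b hab => h2 a b (step_sub m h w S hs a b hab), h3⟩

theorem iter_fix (m : List (List Int)) (h w : Nat) : ∀ f S, pvShape h w S →
    h * w - tcnt S < f → pvStep m h w (pvIter m h w f S) = pvIter m h w f S := by
  intro f
  induction f with
  | zero => intro S hs hf; omega
  | succ f ih =>
    intro S hs hf
    rw [pvIter]
    by_cases heq : pvStep m h w S = S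
    · simp only [heq]
      exact heq
    · simp only [if_neg heq]
      apply ih (pvStep m h w S) (step_shape m h w S)
      have hstrict := tcnt_strict h w S (pvStep m h w S) hs (step_shape m h w S)
        (step_sub m h w S hs) (fun hc => heq hc.symm)
      have hb1 := tcnt_le h w S hs
      have hb2 := tcnt_le h w (pvStep m h w S) (step_shape m h w S)
      omega

theorem sfin_iff (m : List (List Int)) (y x : Nat) :
    pvVget (pvIter m (pvH m) (pvW m) (pvH m * pvW m + 1)
      ((List.range (pvH m)).map (fun a => (List.range (pvW m)).map (fun b =>
        decide (pvMget m a b = 0) && pvEdge (pvH m) (pvW m) a b)))) y x = true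
      ↔ FE m (pvH m) (pvW m) y x := by
  have hs0 : pvShape (pvH m) (pvW m) ((List.range (pvH m)).map (fun a =>
      (List.range (pvW m)).map (fun b =>
        decide (pvMget m a b = 0) && pvEdge (pvH m) (pvW m) a b))) := grid_shape _ _ _
  have hsound0 : ∀ a b, pvVget ((List.range (pvH m)).map (fun a =>
      (List.range (pvW m)).map (fun b =>
        decide (pvMget m a b = 0) && pvEdge (pvH m) (pvW m) a b))) a b = true →
      FE m (pvH m) (pvW m) a b := by
    intro a b hab
    rw [s0_get] at hab
    by_cases hb : a < pvH m ∧ b < pvW m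
    · rw [if_pos hb] at hab
      simp only [Bool.and_eq_true, decide_eq_true_eq] at hab
      exact FE.base a b hb.1 hb.2 ((edgep_iff _ _ a b).mpr hab.2) hab.1
    · rw [if_neg hb] at hab; cases hab
  obtain ⟨hsh, hsub, hsound⟩ := iter_props m (pvH m) (pvW m) (pvH m * pvW m + 1) _ hs0 hsound0
  have hfix := iter_fix m (pvH m) (pvW m) (pvH m * pvW m + 1) _ hs0 (by
    have := tcnt_le (pvH m) (pvW m) _ hs0
    omega)
  constructor
  · exact hsound y x
  · intro hf
    induction hf with
    | base a b ha hb he hz =>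
      apply hsub
      rw [s0_get, if_pos ⟨ha, hb⟩]
      simp only [Bool.and_eq_true, decide_eq_true_eq]
      exact ⟨hz, (edgep_iff _ _ a b).mp he⟩
    | step a b a' b' hf hadj hz ih =>
      have ha' := hadj.2.2.1
      have hb' := hadj.2.2.2.1
      rw [← hfix, step_get, if_pos ⟨ha', hb'⟩]
      simp only [Bool.or_eq_true, Bool.and_eq_true, decide_eq_true_eq]
      exact Or.inr ⟨hz, (nbr_iff _ _ _ a' b' ha' hb').mpr ⟨a, b, adj_symm hadj, ih⟩⟩

theorem bool_eq_of_iff {a b : Bool} (h : a = true ↔ b = true) : a = b := by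
  cases a <;> cases b <;> simp_all

theorem getD_map_range {α : Type} (n : Nat) (g : Nat → α) (i : Nat) (d : α) :
    ((List.range n).map g).getD i d = if i < n then g i else d := by
  by_cases hi : i < n
  · rw [List.getD_eq_getElem _ d (by simpa using hi), List.getElem_map,
      List.getElem_range, if_pos hi]
  · rw [List.getD_eq_default _ _ (by simpa using hi), if_neg hi]

-- ---- the two marking conditions agree ----

theorem cond_iff (m : List (List Int)) (y x : Nat) (hy : y < pvH m) (hx : x < pvW m) :
    (pvDfs (pvH m * pvW m + 1) y x m
        (pvVset ((List.range (pvH m)).map (fun _ => List.replicate (pvW m) false)) y x)).1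
      = (pvEdge (pvH m) (pvW m) y x ||
         pvNbr (pvIter m (pvH m) (pvW m) (pvH m * pvW m + 1)
           ((List.range (pvH m)).map (fun a => (List.range (pvW m)).map (fun b =>
             decide (pvMget m a b = 0) && pvEdge (pvH m) (pvW m) a b)))) (pvH m) (pvW m) y x) := by
  have h1 := dfs_iff_esc m y x hy hx
  have h2 : (pvEdge (pvH m) (pvW m) y x ||
      pvNbr (pvIter m (pvH m) (pvW m) (pvH m * pvW m + 1)
        ((List.range (pvH m)).map (fun a => (List.range (pvW m)).map (fun b =>
          decide (pvMget m a b = 0) && pvEdge (pvH m) (pvW m) a b)))) (pvH m) (pvW m) y x) = true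
      ↔ Esc m (pvH m) (pvW m) y x := by
    constructor
    · intro hor
      rw [Bool.or_eq_true] at hor
      rcases hor with he | hn
      · exact Esc.edge y x hy hx ((edgep_iff _ _ y x).mpr he)
      · obtain ⟨a, b, hadj, hS⟩ := (nbr_iff _ _ _ y x hy hx).mp hn
        have hfe := (sfin_iff m a b).mp hS
        exact Esc.step y x a b hadj (fe_zero hfe).1 (fe_esc hfe)
    · intro he
      rcases he with ⟨_, _, hy', hx', hE⟩ | ⟨_, _, a, b, hadj, hz, he'⟩
      · rw [Bool.or_eq_true]
        exact Or.inl ((edgep_iff _ _ y x).mp hE)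
      · rw [Bool.or_eq_true]
        refine Or.inr ((nbr_iff _ _ _ y x hy hx).mpr ⟨a, b, hadj, ?_⟩)
        exact (sfin_iff m a b).mpr (esc_fe he' hz)
  exact bool_eq_of_iff (h1.trans h2.symm)

-- ---- fold bookkeeping ----

theorem foldl_ext' {α β : Type} (f g : α → β → α) :
    ∀ (l : List β) (a : α), (∀ a' b, b ∈ l → f a' b = g a' b) → l.foldl f a = l.foldl g a := by
  intro l
  induction l with
  | nil => intro a _; rfl
  | cons x xs ih =>
    intro a hfg
    rw [List.foldl_cons, List.foldl_cons, hfg a x (by simp)]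
    exact ih _ (fun a' b hb => hfg a' b (by simp [hb]))

theorem set_getD_self {α : Type} (l : List α) (y : Nat) (d : α) (hy : y < l.length) :
    l.set y (l.getD y d) = l := by
  apply List.ext_getElem (by simp)
  intro i h1 h2
  rw [List.getElem_set]
  split
  · next h => subst h; rw [List.getD_eq_getElem _ _ hy]
  · rfl

theorem inner_fold (cond : Nat → Nat → Bool) (y : Nat) :
    ∀ (xs : List Nat) (cp : List (List Int)), y < cp.length →
      xs.foldl (fun cp x => if cond y x then cp.set y ((cp.getD y []).set x 0) else cp) cp
        = cp.set y (xs.foldl (fun r x => if cond y x then r.set x 0 else r) (cp.getD y [])) := by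
  intro xs
  induction xs with
  | nil => intro cp hy; rw [List.foldl_nil, List.foldl_nil, set_getD_self _ _ _ hy]
  | cons x xs ih =>
    intro cp hy
    simp only [List.foldl_cons]
    by_cases hc : cond y x = true
    · rw [if_pos hc, if_pos hc]
      rw [ih _ (by simpa using hy), getD_set_self cp y _ _ hy, List.set_set]
    · rw [if_neg hc, if_neg hc]
      exact ih cp hy

theorem outer_fold (body : List (List Int) → Nat → List (List Int))
    (F : Nat → List Int → List Int)
    (hbody : ∀ cp y, y < cp.length → body cp y = cp.set y (F y (cp.getD y []))) :
    ∀ (n : Nat) (cp : List (List Int)), n ≤ cp.length →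
      ((List.range n).foldl body cp).length = cp.length ∧
      ∀ y, ((List.range n).foldl body cp).getD y []
        = if y < n then F y (cp.getD y []) else cp.getD y [] := by
  intro n
  induction n with
  | zero => intro cp hn; exact ⟨rfl, fun y => by simp⟩
  | succ n ih =>
    intro cp hn
    obtain ⟨ihlen, ihget⟩ := ih cp (by omega)
    rw [List.range_succ, List.foldl_append, List.foldl_cons, List.foldl_nil]
    have hlt : n < ((List.range n).foldl body cp).length := by rw [ihlen]; omega
    rw [hbody _ n hlt]
    constructor
    · rw [List.length_set, ihlen]
    · intro y
      by_cases hyn : y = n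
      · subst hyn
        rw [getD_set_self _ _ _ _ hlt, ihget y, if_neg (by omega), if_pos (by omega)]
      · rw [getD_set_ne _ n y _ _ (fun hc => hyn hc.symm), ihget y]
        by_cases hy : y < n
        · rw [if_pos hy, if_pos (by omega)]
        · rw [if_neg hy, if_neg (by omega)]

def condA (target : Int) (m : List (List Int)) (y x : Nat) : Bool :=
  decide (pvMget m y x = target) &&
    (pvDfs (pvH m * pvW m + 1) y x m
      (pvVset ((List.range (pvH m)).map (fun _ => List.replicate (pvW m) false)) y x)).1

def condB (target : Int) (m : List (List Int)) (y x : Nat) : Bool :=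
  decide (pvMget m y x = target) &&
    (pvEdge (pvH m) (pvW m) y x ||
      pvNbr (pvIter m (pvH m) (pvW m) (pvH m * pvW m + 1)
        ((List.range (pvH m)).map (fun a => (List.range (pvW m)).map (fun b =>
          decide (pvMget m a b = 0) && pvEdge (pvH m) (pvW m) a b)))) (pvH m) (pvW m) y x)

theorem condAB (target : Int) (m : List (List Int)) (y x : Nat)
    (hy : y < pvH m) (hx : x < pvW m) : condA target m y x = condB target m y x := by
  unfold condA condB
  rw [cond_iff m y x hy hx]

theorem main_eq (target : Int) (matrix : List (List Int)) :
    boundary_check target matrix = boundary_check_alt target matrix := by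
  have hbc : boundary_check target matrix
      = (List.range (pvH matrix)).foldl (fun cp y =>
          (List.range (pvW matrix)).foldl (fun cp x =>
            if pvMget matrix y x = target then
              (if (pvDfs (pvH matrix * pvW matrix + 1) y x matrix
                    (pvVset ((List.range (pvH matrix)).map
                      (fun _ => List.replicate (pvW matrix) false)) y x)).1 then
                cp.set y ((cp.getD y []).set x 0)
              else cp)
            else cp) cp) matrix := rfl
  have hbalt : boundary_check_alt target matrix
      = (List.range (pvH matrix)).map (fun y =>
          (List.range (pvW matrix)).foldl (fun row x =>
            if condB target matrix y x then row.set x 0 else row) (matrix.getD y [])) := rfl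
  have hbody : ∀ (cp : List (List Int)) (y : Nat), y < cp.length →
      (List.range (pvW matrix)).foldl (fun cp x =>
        if pvMget matrix y x = target then
          (if (pvDfs (pvH matrix * pvW matrix + 1) y x matrix
                (pvVset ((List.range (pvH matrix)).map
                  (fun _ => List.replicate (pvW matrix) false)) y x)).1 then
            cp.set y ((cp.getD y []).set x 0)
          else cp)
        else cp) cp
      = cp.set y ((List.range (pvW matrix)).foldl (fun r x =>
          if condA target matrix y x then r.set x 0 else r) (cp.getD y [])) := by
    intro cp y hy
    refine (foldl_ext' (fun cp x =>
        if pvMget matrix y x = target then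
          (if (pvDfs (pvH matrix * pvW matrix + 1) y x matrix
            (pvVset ((List.range (pvH matrix)).map
              (fun _ => List.replicate (pvW matrix) false)) y x)).1 then
            cp.set y ((cp.getD y []).set x 0)
          else cp)
        else cp)
      (fun cp x => if condA target matrix y x then cp.set y ((cp.getD y []).set x 0) else cp)
      (List.range (pvW matrix)) cp ?_).trans (inner_fold (condA target matrix) y _ cp hy)
    intro cp' x hx
    beta_reduce
    by_cases h1 : pvMget matrix y x = target
    · by_cases h2 : (pvDfs (pvH matrix * pvW matrix + 1) y x matrix
            (pvVset ((List.range (pvH matrix)).map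
              (fun _ => List.replicate (pvW matrix) false)) y x)).1 = true
      · have hca : condA target matrix y x = true := by
          unfold condA
          rw [h2, decide_eq_true h1]
          rfl
        rw [if_pos h1, if_pos h2, if_pos hca]
      · have h2f : (pvDfs (pvH matrix * pvW matrix + 1) y x matrix
            (pvVset ((List.range (pvH matrix)).map
              (fun _ => List.replicate (pvW matrix) false)) y x)).1 = false := by
          cases hb : (pvDfs (pvH matrix * pvW matrix + 1) y x matrix
            (pvVset ((List.range (pvH matrix)).map
              (fun _ => List.replicate (pvW matrix) false)) y x)).1
          · rfl
          · exact absurd hb h2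
        have hca : condA target matrix y x = false := by
          unfold condA
          rw [h2f]
          simp
        rw [if_pos h1, if_neg h2, if_neg (by rw [hca]; simp)]
    · have hca : condA target matrix y x = false := by
        unfold condA
        rw [decide_eq_false h1]
        simp
      rw [if_neg h1, if_neg (by rw [hca]; simp)]
  have hout := outer_fold _ (fun y r => (List.range (pvW matrix)).foldl (fun r x =>
      if condA target matrix y x then r.set x 0 else r) r) hbody (pvH matrix) matrix (le_refl _)
  rw [hbc, hbalt]
  apply List.ext_getElem
  · rw [hout.1]; simp [pvH]
  · intro i hi1 hi2
    have hih : i < pvH matrix := by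
      simpa using hi2
    rw [← List.getD_eq_getElem _ [] hi1, ← List.getD_eq_getElem _ [] hi2]
    rw [hout.2 i, if_pos hih, getD_map_range, if_pos hih]
    apply foldl_ext'
    intro r x hx
    have hxw : x < pvW matrix := List.mem_range.mp hx
    rw [condAB target matrix i x hih hxw]

-- ===== VERDICT (by name: the statement is the Claim_ definition above) =====
theorem boundary_check_spec : Claim_equal_boundary_check := by
  intro target matrix _ _
  unfold Spec_boundary_check
  exact main_eq target matrix
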